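-- pv_equiv track=rewrite | github.com/yang4978/-OJ | Python/1905. 【认证试题】销售点分布调查.py | point_sale_survey
-- ===== SOURCE A (Python) =====
-- def point_sale_survey(total_sales, relation_map, appoint_sales):
--     # 在此添加你的代码
--     result = [1, 1]
--     queue = [appoint_sales]
--     layer = 1
--
--     while queue:
--         temp = 0
--         layer += 1
--         for _ in range(len(queue)):
--             leader = queue.pop(0)
--             for num, arr in relation_map.items():
--                 if num == leader:
--                     temp += len(arr)
--                     queue += arr
--         if temp > result[1]:
--             result = [layer, temp]
--
--     return result
-- ===== SOURCE B (Python) =====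
-- def point_sale_survey(total_sales, relation_map, appoint_sales):
--     # DFS from the appointed sales point, accumulating per-layer node counts
--     # in a list indexed by depth; then pick the earliest layer whose count
--     # strictly exceeds the running maximum (layer 1 has the single root).
--     counts = [1]  # counts[i] = number of sales points at layer i + 1
--
--     def dfs(node, depth):
--         children = relation_map.get(node, [])
--         if children:
--             if len(counts) <= depth:
--                 counts.append(0)
--             counts[depth] += len(children)
--             for child in children:
--                 dfs(child, depth + 1)
--
--     dfs(appoint_sales, 1)
--
--     best_layer, best_count = 1, 1
--     for i in range(1, len(counts)):
--         if counts[i] > best_count: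
--             best_layer, best_count = i + 1, counts[i]
--     return [best_layer, best_count]
-- ===== Notes on version B (the rewrite author's own statement) =====
-- stated objective: alternative
-- what changed: Replaced the BFS with a pop(0) queue and per-layer dict-items rescans by a recursive DFS that accumulates per-layer node counts into a depth-indexed list via relation_map.get, followed by a single ascending scan picking the earliest strictly-greater layer.
import Mathlib
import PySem

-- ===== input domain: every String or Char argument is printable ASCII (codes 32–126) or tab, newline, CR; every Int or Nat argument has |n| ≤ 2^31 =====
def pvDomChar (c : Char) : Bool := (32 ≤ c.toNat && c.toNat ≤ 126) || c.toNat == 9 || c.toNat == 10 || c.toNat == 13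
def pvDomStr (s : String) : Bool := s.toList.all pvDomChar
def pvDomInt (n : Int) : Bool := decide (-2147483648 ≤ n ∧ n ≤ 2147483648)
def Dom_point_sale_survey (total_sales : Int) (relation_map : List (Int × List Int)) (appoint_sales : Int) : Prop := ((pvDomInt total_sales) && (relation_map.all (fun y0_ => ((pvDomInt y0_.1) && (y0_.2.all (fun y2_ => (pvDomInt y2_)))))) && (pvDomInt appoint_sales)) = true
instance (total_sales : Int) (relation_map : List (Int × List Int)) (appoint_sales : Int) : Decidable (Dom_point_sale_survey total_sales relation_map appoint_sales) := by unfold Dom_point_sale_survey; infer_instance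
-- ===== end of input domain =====

-- B replaces A's queue-BFS (with its per-node rescan of relation_map.items()) by a recursive
-- DFS that accumulates per-layer node counts into a depth-indexed list, then scans it once;
-- objective: alternative (same traversal cost, different algorithm).

-- ===== PORT A =====
-- inner 'for num, arr in relation_map.items(): if num == leader: temp += len(arr); queue += arr'
def pvAinner (m : List (Int × List Int)) (leader : Int) (acc : Int × List Int) : Int × List Int :=
  m.foldl (fun p kv => if kv.1 == leader then (p.1 + (kv.2.length : Int), p.2 ++ kv.2) else p) acc

-- 'for _ in range(len(queue)): leader = queue.pop(0); …' — n = the length measured at loop entry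
def pvAfor (m : List (Int × List Int)) : Nat → Int → List Int → Int × List Int
  | 0, t, q => (t, q)
  | n + 1, t, q =>
    match q with
    | [] => (t, q)   -- unreachable: n is at most the queue length
    | leader :: rest =>
      let p := pvAinner m leader (t, rest)
      pvAfor m n p.1 p.2

-- the 'while queue:' loop; fuel bounds the number of layers (under Pre_ it is never exhausted).
-- result is always the 2-element list [layer, count]: carried as the pair r = (result[0], result[1]).
def pvAloop (m : List (Int × List Int)) : Nat → List Int → Int → Int × Int → Int × Int
  | 0, _, _, r => r
  | f + 1, q, layer, r =>
    if q.isEmpty then r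
    else
      let layer' := layer + 1
      let p := pvAfor m q.length 0 q
      let r' := if p.1 > r.2 then (layer', p.1) else r
      pvAloop m f p.2 layer' r'

def point_sale_survey (total_sales : Int) (relation_map : List (Int × List Int)) (appoint_sales : Int) : List Int :=
  let r := pvAloop relation_map (relation_map.length + 2) [appoint_sales] 1 (1, 1)
  [r.1, r.2]

-- ===== PORT B =====
-- relation_map.get(node, [])
def pvChildB (m : List (Int × List Int)) (x : Int) : List Int :=
  PySem.Dict.getD (PySem.Dict.mk m) x []

-- the nested 'def dfs(node, depth)' of Source B; depth is ≥ 1 throughout, kept as a Nat index.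
-- fuel bounds the recursion depth (never exhausted under Pre_).
-- 'counts[depth] += len(children)' is in range after the conditional append, so List.getD/set are exact.
mutual
def pvDfs (m : List (Int × List Int)) : Nat → Int → Nat → List Int → List Int
  | 0, _, _, counts => counts
  | f + 1, node, depth, counts =>
    let ch := pvChildB m node
    if ch.isEmpty then counts
    else
      let counts1 := if counts.length ≤ depth then counts ++ [0] else counts
      let counts2 := counts1.set depth (counts1.getD depth 0 + (ch.length : Int))
      pvDfsAll m f ch (depth + 1) counts2
termination_by f _ _ _ => (f, 0)
def pvDfsAll (m : List (Int × List Int)) : Nat → List Int → Nat → List Int → List Int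
  | _, [], _, counts => counts
  | f, c :: rest, depth, counts => pvDfsAll m f rest depth (pvDfs m f c depth counts)
termination_by f l _ _ => (f, l.length + 1)
end

def point_sale_survey_alt (total_sales : Int) (relation_map : List (Int × List Int)) (appoint_sales : Int) : List Int :=
  let counts := pvDfs relation_map (relation_map.length + 2) appoint_sales 1 [1]
  let p := (PySem.List.pyRange 1 (counts.length : Int) 1).foldl
      (fun (b : Int × Int) i =>
        let v := PySem.List.pyGetD counts i 0
        if v > b.2 then (i + 1, v) else b) (1, 1)
  [p.1, p.2]

-- ===== PRECONDITION & SPEC =====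
-- one BFS/DFS expansion step: all children of the points in F, in order
def pvFlatPre (m : List (Int × List Int)) (F : List Int) : List Int :=
  F.flatMap (pvChildB m)

-- the set of points reachable from S in at most j steps (j = |relation_map|+1 saturates)
def pvReach (m : List (Int × List Int)) : Nat → List Int → List Int
  | 0, S => S
  | j + 1, S => pvReach m j (PySem.Set.ofList (S ++ pvFlatPre m S))

-- Pre_ excludes relation maps with duplicate keys (not representable by a Python dict, on which
-- the assoc-list reading of 'relation_map.items()' is ambiguous) and relation maps with a cycle
-- reachable from appoint_sales, on which A's BFS loop never terminates.
def Pre_point_sale_survey (total_sales : Int) (relation_map : List (Int × List Int)) (appoint_sales : Int) : Prop :=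
  (relation_map.map Prod.fst).Nodup ∧
  ∀ x ∈ pvReach relation_map (relation_map.length + 1) [appoint_sales],
    x ∉ pvReach relation_map (relation_map.length + 1) (pvChildB relation_map x)

instance (total_sales : Int) (relation_map : List (Int × List Int)) (appoint_sales : Int) : Decidable (Pre_point_sale_survey total_sales relation_map appoint_sales) := by
  unfold Pre_point_sale_survey; infer_instance

def pvWitness_point_sale_survey : Int × (List (Int × List Int)) × Int :=
  (9, [(1, [2, 3]), (2, [4, 5, 6]), (3, [])], 1)

def Spec_point_sale_survey (total_sales : Int) (relation_map : List (Int × List Int)) (appoint_sales : Int) (out : List Int) : Prop := out = point_sale_survey_alt total_sales relation_map appoint_sales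
instance (total_sales : Int) (relation_map : List (Int × List Int)) (appoint_sales : Int) (out : List Int) : Decidable (Spec_point_sale_survey total_sales relation_map appoint_sales out) := by unfold Spec_point_sale_survey; infer_instance

-- ===== CLAIM (what is proved, stated in full; the proofs are below) =====
def Claim_equal_point_sale_survey : Prop := ∀ (total_sales : Int) (relation_map : List (Int × List Int)) (appoint_sales : Int), Dom_point_sale_survey total_sales relation_map appoint_sales → Pre_point_sale_survey total_sales relation_map appoint_sales → Spec_point_sale_survey total_sales relation_map appoint_sales (point_sale_survey total_sales relation_map appoint_sales)

-- ===== LEMMAS AND PROOFS =====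

-- the j-th frontier of the traversal
def pvFrontN (m : List (Int × List Int)) : Nat → List Int → List Int
  | 0, F => F
  | j + 1, F => pvFrontN m j (pvFlatPre m F)

-- frontier sizes, stopping at the first empty frontier (no trailing zero)
def pvPos (m : List (Int × List Int)) : Nat → List Int → List Int
  | 0, _ => []
  | f + 1, F => if F.isEmpty then [] else (F.length : Int) :: pvPos m f (pvFlatPre m F)

-- frontier sizes as A's loop sees them: one entry per executed loop iteration (trailing zero kept)
def pvSizes (m : List (Int × List Int)) : Nat → List Int → List Int
  | 0, _ => []
  | f + 1, F => if F.isEmpty then [] else ((pvFlatPre m F).length : Int) :: pvSizes m f (pvFlatPre m F)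

-- the earliest-strict-max scan shared by both programs
def pvSel : List Int → Int → Int × Int → Int × Int
  | [], _, r => r
  | v :: vs, layer, r => pvSel vs (layer + 1) (if v > r.2 then (layer + 1, v) else r)

-- ragged pointwise addition of count vectors
def pvRadd : List Int → List Int → List Int
  | [], ys => ys
  | x :: xs, [] => x :: xs
  | x :: xs, y :: ys => (x + y) :: pvRadd xs ys

-- walks in the relation graph
def pvWalk (m : List (Int × List Int)) : Int → List Int → Int → Prop
  | x, [], y => x = y
  | x, z :: l, y => z ∈ pvChildB m x ∧ pvWalk m z l y


-- ---- children lookup ----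
lemma pv_childB_nil (x : Int) : pvChildB [] x = [] := by
  simp [pvChildB, PySem.Dict.getD_eq_get?_getD]
  rfl

lemma pv_childB_cons (k : Int) (v : List Int) (rest : List (Int × List Int)) (x : Int) :
    pvChildB ((k, v) :: rest) x = if k = x then v else pvChildB rest x := by
  simp only [pvChildB, PySem.Dict.getD_eq_get?_getD, PySem.Dict.get?_mk_cons]
  by_cases h : k = x
  · simp [h]
  · simp [h, Ne.symm h]

lemma pv_childB_not_mem {m : List (Int × List Int)} {x : Int} (h : x ∉ m.map Prod.fst) :
    pvChildB m x = [] := by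
  induction m with
  | nil => exact pv_childB_nil x
  | cons kv rest ih =>
    obtain ⟨k, v⟩ := kv
    rw [pv_childB_cons]
    simp only [List.map_cons, List.mem_cons] at h
    push_neg at h
    rw [if_neg (Ne.symm h.1)]
    exact ih h.2

lemma pv_childB_mem_keys {m : List (Int × List Int)} {x : Int} (h : pvChildB m x ≠ []) :
    x ∈ m.map Prod.fst := by
  by_contra hx
  exact h (pv_childB_not_mem hx)

-- ---- frontier facts ----
lemma pv_flat_cons (m : List (Int × List Int)) (x : Int) (F : List Int) :
    pvFlatPre m (x :: F) = pvChildB m x ++ pvFlatPre m F := rfl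

lemma pv_flat_singleton (m : List (Int × List Int)) (x : Int) :
    pvFlatPre m [x] = pvChildB m x := by
  simp [pvFlatPre]

lemma pv_flat_append (m : List (Int × List Int)) (E G : List Int) :
    pvFlatPre m (E ++ G) = pvFlatPre m E ++ pvFlatPre m G := by
  simp [pvFlatPre]

lemma pv_frontN_mono {m : List (Int × List Int)} :
    ∀ (j : Nat) {E F : List Int} {y : Int}, (∀ e ∈ E, e ∈ F) →
      y ∈ pvFrontN m j E → y ∈ pvFrontN m j F := by
  intro j
  induction j with
  | zero => intro E F y hs hy; exact hs y hy
  | succ j ih =>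
    intro E F y hs hy
    simp only [pvFrontN] at hy ⊢
    refine ih ?_ hy
    intro e he
    simp only [pvFlatPre, List.mem_flatMap] at he ⊢
    obtain ⟨x, hx, hex⟩ := he
    exact ⟨x, hs x hx, hex⟩

lemma pv_frontN_empty_of_subset {m : List (Int × List Int)} {E F : List Int} {j : Nat}
    (hs : ∀ e ∈ E, e ∈ F) (h : pvFrontN m j F = []) : pvFrontN m j E = [] := by
  rcases hhe : pvFrontN m j E with _ | ⟨y, ys⟩
  · rfl
  · exfalso
    have : y ∈ pvFrontN m j E := by rw [hhe]; exact List.mem_cons_self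
    have := pv_frontN_mono j hs this
    rw [h] at this
    exact (List.not_mem_nil) this

lemma pv_frontN_empty_succ {m : List (Int × List Int)} :
    ∀ (j : Nat) (F : List Int), pvFrontN m j F = [] → pvFrontN m (j + 1) F = [] := by
  intro j
  induction j with
  | zero =>
    intro F hF
    simp only [pvFrontN] at hF ⊢
    subst hF
    rfl
  | succ j ih =>
    intro F hF
    simp only [pvFrontN] at hF ⊢
    exact ih _ hF

lemma pv_frontN_empty_mono {m : List (Int × List Int)} {j f : Nat} {F : List Int}
    (hjf : j ≤ f) (h : pvFrontN m j F = []) : pvFrontN m f F = [] := by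
  induction f with
  | zero =>
    have : j = 0 := Nat.le_zero.mp hjf
    subst this; exact h
  | succ f ih =>
    rcases Nat.lt_or_ge j (f + 1) with hlt | hge
    · exact pv_frontN_empty_succ f F (ih (Nat.lt_succ_iff.mp hlt) )
    · have : j = f + 1 := le_antisymm hjf hge
      subst this; exact h


-- ---- ragged addition ----
lemma pv_radd_nil_right (xs : List Int) : pvRadd xs [] = xs := by
  cases xs <;> rfl

lemma pv_radd_length (xs ys : List Int) : (pvRadd xs ys).length = max xs.length ys.length := by
  induction xs generalizing ys with
  | nil => simp [pvRadd]
  | cons x xs ih =>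
    cases ys with
    | nil => simp [pvRadd]
    | cons y ys => simp [pvRadd, ih]

lemma pv_radd_replicate_zero : ∀ (d : Nat) (xs : List Int), d ≤ xs.length →
    pvRadd xs (List.replicate d 0) = xs := by
  intro d
  induction d with
  | zero => intro xs _; simp [pv_radd_nil_right]
  | succ d ih =>
    intro xs h
    cases xs with
    | nil => simp at h
    | cons x xs =>
      simp only [List.replicate_succ, pvRadd, add_zero]
      rw [ih xs (by simpa using h)]

lemma pv_radd_assoc : ∀ (a b c : List Int), pvRadd (pvRadd a b) c = pvRadd a (pvRadd b c) := by
  intro a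
  induction a with
  | nil => intro b c; simp [pvRadd]
  | cons x xs ih =>
    intro b c
    cases b with
    | nil => simp [pvRadd]
    | cons y ys =>
      cases c with
      | nil => simp [pv_radd_nil_right, pvRadd]
      | cons z zs => simp [pvRadd, ih, add_assoc]

lemma pv_radd_prefix_zero : ∀ (d : Nat) (P1 P2 : List Int),
    pvRadd (List.replicate d 0 ++ P1) (List.replicate d 0 ++ P2) =
      List.replicate d 0 ++ pvRadd P1 P2 := by
  intro d
  induction d with
  | zero => intro P1 P2; simp
  | succ d ih =>
    intro P1 P2
    simp only [List.replicate_succ, List.cons_append, pvRadd, add_zero]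
    rw [ih]


-- ---- A-side characterisation ----
lemma pv_ainner_not_mem {m : List (Int × List Int)} {leader : Int}
    (h : leader ∉ m.map Prod.fst) (acc : Int × List Int) : pvAinner m leader acc = acc := by
  induction m generalizing acc with
  | nil => rfl
  | cons kv rest ih =>
    obtain ⟨k, v⟩ := kv
    simp only [List.map_cons, List.mem_cons] at h
    push_neg at h
    simp only [pvAinner, List.foldl_cons]
    rw [if_neg (by simpa using Ne.symm h.1)]
    exact ih h.2 acc

lemma pv_ainner_eq {m : List (Int × List Int)} (hnd : (m.map Prod.fst).Nodup)
    (leader t : Int) (q : List Int) :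
    pvAinner m leader (t, q) = (t + ((pvChildB m leader).length : Int), q ++ pvChildB m leader) := by
  induction m generalizing t q with
  | nil => simp [pvAinner, pv_childB_nil]
  | cons kv rest ih =>
    obtain ⟨k, v⟩ := kv
    simp only [List.map_cons, List.nodup_cons] at hnd
    rw [pv_childB_cons]
    by_cases hk : k = leader
    · subst hk
      simp only [pvAinner, List.foldl_cons, beq_self_eq_true, if_true]
      have h2 := pv_ainner_not_mem (m := rest) (leader := k) hnd.1 (t + (v.length : Int), q ++ v)
      simp only [pvAinner, beq_iff_eq] at h2
      simp only [beq_iff_eq]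
      exact h2
    · simp only [pvAinner, List.foldl_cons]
      rw [if_neg (by simpa using hk), if_neg hk]
      exact ih hnd.2 t q

lemma pv_afor_eq {m : List (Int × List Int)} (hnd : (m.map Prod.fst).Nodup) :
    ∀ (pending acc : List Int) (t : Int),
      pvAfor m pending.length t (pending ++ acc) =
        (t + ((pvFlatPre m pending).length : Int), acc ++ pvFlatPre m pending) := by
  intro pending
  induction pending with
  | nil => intro acc t; simp [pvAfor, pvFlatPre]
  | cons leader rest ih =>
    intro acc t
    simp only [List.cons_append, List.length_cons, pvAfor]
    rw [pv_ainner_eq hnd]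
    dsimp only
    rw [List.append_assoc, ih (acc ++ pvChildB m leader) (t + ((pvChildB m leader).length : Int))]
    simp [pv_flat_cons, List.length_append, List.append_assoc, add_assoc]

lemma pv_aloop_eq {m : List (Int × List Int)} (hnd : (m.map Prod.fst).Nodup) :
    ∀ (f : Nat) (F : List Int) (layer : Int) (r : Int × Int),
      pvAloop m f F layer r = pvSel (pvSizes m f F) layer r := by
  intro f
  induction f with
  | zero => intro F layer r; simp [pvAloop, pvSizes, pvSel]
  | succ f ih =>
    intro F layer r
    by_cases hF : F.isEmpty
    · simp [pvAloop, pvSizes, hF, pvSel]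
    · simp only [pvAloop, pvSizes, hF, if_neg, Bool.false_eq_true, if_false]
      have hfor := pv_afor_eq hnd F [] 0
      rw [List.append_nil] at hfor
      rw [hfor]
      simp only [zero_add, List.nil_append]
      rw [ih]
      rfl

-- ---- size-list facts ----
lemma pv_sizes_nil (m : List (Int × List Int)) (f : Nat) : pvSizes m f [] = [] := by
  cases f <;> simp [pvSizes]

lemma pv_pos_nil (m : List (Int × List Int)) (f : Nat) : pvPos m f [] = [] := by
  cases f <;> simp [pvPos]

lemma pv_sizes_eq_pos {m : List (Int × List Int)} :
    ∀ (f j : Nat) (F : List Int), F ≠ [] → pvFrontN m j F = [] → j ≤ f →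
      pvSizes m f F = pvPos m f (pvFlatPre m F) ++ [0] := by
  intro f
  induction f with
  | zero =>
    intro j F hF h hj
    have hj0 : j = 0 := by omega
    subst hj0
    simp only [pvFrontN] at h
    exact absurd h hF
  | succ f ih =>
    intro j F hF h hj
    have hFe : F.isEmpty = false := by simp [List.isEmpty_iff, hF]
    rcases j with _ | j
    · simp only [pvFrontN] at h
      exact absurd h hF
    simp only [pvFrontN] at h
    simp only [pvSizes, hFe, Bool.false_eq_true, if_false]
    by_cases hG : pvFlatPre m F = []
    · rw [hG]
      simp [pv_sizes_nil, pv_pos_nil]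
    · rw [ih j (pvFlatPre m F) hG h (by omega)]
      have hGe : (pvFlatPre m F).isEmpty = false := by simp [List.isEmpty_iff, hG]
      simp only [pvPos, hGe, Bool.false_eq_true, if_false]
      simp

lemma pv_pos_append {m : List (Int × List Int)} :
    ∀ (f : Nat) (E G : List Int),
      pvPos m f (E ++ G) = pvRadd (pvPos m f E) (pvPos m f G) := by
  intro f
  induction f with
  | zero => intro E G; simp [pvPos, pvRadd]
  | succ f ih =>
    intro E G
    cases E with
    | nil => simp [pvPos, pvRadd]
    | cons e es =>
      cases G with
      | nil => simp [pv_pos_nil, pv_radd_nil_right]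
      | cons g gs =>
        simp only [pvPos]
        have h1 : ((e :: es) ++ g :: gs : List Int).isEmpty = false := by simp
        rw [h1]
        simp only [List.isEmpty_cons, Bool.false_eq_true, if_false]
        rw [pv_flat_append, ih]
        simp only [pvRadd]
        congr 1
        push_cast [List.length_append]
        ring

-- ---- selection scan ----
lemma pv_sel_append_zero :
    ∀ (vs : List Int) (layer : Int) (r : Int × Int), 1 ≤ r.2 →
      pvSel (vs ++ [0]) layer r = pvSel vs layer r := by
  intro vs
  induction vs with
  | nil =>
    intro layer r h
    simp only [List.nil_append, pvSel]
    rw [if_neg (by omega)]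
  | cons v vs ih =>
    intro layer r h
    simp only [List.cons_append, pvSel]
    apply ih
    by_cases hv : v > r.2
    · simp only [if_pos hv]; omega
    · simp only [if_neg hv]; exact h

-- the 'append a zero slot if needed, then bump slot d' step of pvDfs, seen as ragged addition
lemma pv_radd_bump : ∀ (d : Nat) (counts : List Int) (v : Int) (vs : List Int),
    d ≤ counts.length →
    pvRadd counts (List.replicate d 0 ++ v :: vs) =
      pvRadd ((if counts.length ≤ d then counts ++ [0] else counts).set d
          ((if counts.length ≤ d then counts ++ [0] else counts).getD d 0 + v))
        (List.replicate (d + 1) 0 ++ vs) := by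
  intro d
  induction d with
  | zero =>
    intro counts v vs h
    cases counts with
    | nil =>
      simp [pvRadd, List.replicate_succ, List.set, List.getD]
    | cons c cs =>
      rw [if_neg (by simp)]
      simp [pvRadd, List.replicate_succ, List.set_cons_zero, List.getD_cons_zero]
  | succ d ih =>
    intro counts v vs h
    cases counts with
    | nil => simp at h
    | cons c cs =>
      have hcs : d ≤ cs.length := by simpa using h
      have hb : (if (c :: cs).length ≤ d + 1 then (c :: cs) ++ [0] else (c :: cs)) =
          c :: (if cs.length ≤ d then cs ++ [0] else cs) := by
        by_cases hc : cs.length ≤ d <;> simp [hc]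
      rw [hb]
      simp only [List.getD_cons_succ, List.set_cons_succ, List.replicate_succ,
        List.cons_append, pvRadd, add_zero]
      rw [ih cs v vs hcs]
      simp [List.replicate_succ]

-- ---- DFS characterisation ----
lemma pv_dfs_both (m : List (Int × List Int)) : ∀ (f : Nat),
    (∀ (x : Int) (d : Nat) (counts : List Int), d ≤ counts.length →
      pvFrontN m f (pvChildB m x) = [] →
      pvDfs m f x d counts = pvRadd counts (List.replicate d 0 ++ pvPos m f (pvChildB m x))) ∧
    (∀ (F : List Int) (d : Nat) (counts : List Int), d ≤ counts.length →
      (∀ x ∈ F, pvFrontN m f (pvChildB m x) = []) →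
      pvDfsAll m f F d counts = pvRadd counts (List.replicate d 0 ++ pvPos m f (pvFlatPre m F))) := by
  intro f
  induction f with
  | zero =>
    constructor
    · intro x d counts hd h
      simp only [pvFrontN] at h
      simp only [pvDfs, pvPos, List.append_nil]
      exact (pv_radd_replicate_zero d counts hd).symm
    · intro F
      induction F with
      | nil =>
        intro d counts hd _
        simp only [pvDfsAll, pvPos, List.append_nil]
        exact (pv_radd_replicate_zero d counts hd).symm
      | cons c cf ihF =>
        intro d counts hd hall
        simp only [pvDfsAll, pvDfs]
        have := ihF d counts hd (fun x hx => hall x (List.mem_cons_of_mem c hx))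
        simp only [pvPos, List.append_nil] at this ⊢
        exact this
  | succ f ih =>
    obtain ⟨ihS, ihA⟩ := ih
    have hsingle : ∀ (x : Int) (d : Nat) (counts : List Int), d ≤ counts.length →
        pvFrontN m (f + 1) (pvChildB m x) = [] →
        pvDfs m (f + 1) x d counts =
          pvRadd counts (List.replicate d 0 ++ pvPos m (f + 1) (pvChildB m x)) := by
      intro x d counts hd h
      by_cases hch : (pvChildB m x).isEmpty
      · have hc : pvChildB m x = [] := by simpa [List.isEmpty_iff] using hch
        simp only [pvDfs, hch, hc, pv_pos_nil, List.append_nil]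
        exact (pv_radd_replicate_zero d counts hd).symm
      · have hc : pvChildB m x ≠ [] := by simpa [List.isEmpty_iff] using hch
        simp only [pvDfs, hch, Bool.false_eq_true, if_false]
        simp only [pvFrontN] at h
        have hall : ∀ y ∈ pvChildB m x, pvFrontN m f (pvChildB m y) = [] := by
          intro y hy
          apply pv_frontN_empty_of_subset ?_ h
          intro e he
          simp only [pvFlatPre, List.mem_flatMap]
          exact ⟨y, hy, he⟩
        have hd2 : d + 1 ≤ ((if counts.length ≤ d then counts ++ [0] else counts).set d
            ((if counts.length ≤ d then counts ++ [0] else counts).getD d 0 +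
              ((pvChildB m x).length : Int))).length := by
          rw [List.length_set]
          by_cases hcc : counts.length ≤ d <;> simp [hcc] <;> omega
        rw [ihA (pvChildB m x) (d + 1) _ hd2 hall]
        have hpos : pvPos m (f + 1) (pvChildB m x) =
            ((pvChildB m x).length : Int) :: pvPos m f (pvFlatPre m (pvChildB m x)) := by
          simp only [pvPos, hch, Bool.false_eq_true, if_false]
        rw [hpos, pv_radd_bump d counts _ _ hd]
    refine ⟨hsingle, ?_⟩
    intro F
    induction F with
    | nil =>
      intro d counts hd _
      simp only [pvDfsAll, pvFlatPre, List.flatMap_nil, pv_pos_nil, List.append_nil]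
      exact (pv_radd_replicate_zero d counts hd).symm
    | cons c cf ihF =>
      intro d counts hd hall
      simp only [pvDfsAll]
      rw [hsingle c d counts hd (hall c List.mem_cons_self)]
      have hd' : d ≤ (pvRadd counts
          (List.replicate d 0 ++ pvPos m (f + 1) (pvChildB m c))).length := by
        rw [pv_radd_length]
        omega
      rw [ihF d _ hd' (fun x hx => hall x (List.mem_cons_of_mem c hx))]
      rw [pv_radd_assoc, pv_radd_prefix_zero]
      rw [pv_flat_cons, pv_pos_append]

-- ---- the final index scan of B is the selection scan ----
lemma pv_sel_fold : ∀ (tail pre : List Int) (r : Int × Int),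
    (PySem.List.pyRange (pre.length : Int) (((pre ++ tail).length : Nat) : Int) 1).foldl
        (fun (b : Int × Int) i =>
          let v := PySem.List.pyGetD (pre ++ tail) i 0
          if v > b.2 then (i + 1, v) else b) r =
      pvSel tail (pre.length : Int) r := by
  intro tail
  induction tail with
  | nil =>
    intro pre r
    have hnil : PySem.List.pyRange (pre.length : Int) (((pre ++ ([] : List Int)).length : Nat) : Int) 1 = [] := by
      rw [List.append_nil]
      refine List.eq_nil_iff_forall_not_mem.mpr ?_
      intro x hx
      rw [PySem.List.mem_pyRange_one] at hx
      omega
    rw [hnil]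
    rfl
  | cons t ts ih =>
    intro pre r
    have hlt : (pre.length : Int) < (((pre ++ t :: ts).length : Nat) : Int) := by
      simp only [List.length_append, List.length_cons]
      push_cast
      omega
    rw [PySem.List.pyRange_one_cons hlt, List.foldl_cons]
    have hv : PySem.List.pyGetD (pre ++ t :: ts) ((pre.length : Nat) : Int) 0 = t := by
      rw [PySem.List.pyGetD_natCast, List.getD_append_right _ _ _ _ (le_refl _)]
      simp
    simp only [hv]
    have hpre := ih (pre ++ [t]) (if t > r.2 then ((pre.length : Int) + 1, t) else r)
    simp only [List.append_assoc, List.singleton_append, List.length_append,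
      List.length_cons, List.length_nil] at hpre ⊢
    push_cast at hpre ⊢
    rw [hpre]
    simp only [pvSel]

-- ---- termination of the traversal under Pre_ ----
lemma pv_reach_seed {m : List (Int × List Int)} :
    ∀ (j : Nat) (S : List Int) (x : Int), x ∈ S → x ∈ pvReach m j S := by
  intro j
  induction j with
  | zero => intro S x hx; exact hx
  | succ j ih =>
    intro S x hx
    simp only [pvReach]
    apply ih
    rw [PySem.Set.mem_ofList]
    exact List.mem_append_left _ hx

lemma pv_reach_of_walk {m : List (Int × List Int)} :
    ∀ (l : List Int) (j : Nat) (x y : Int) (S : List Int),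
      pvWalk m x l y → l.length ≤ j → x ∈ S → y ∈ pvReach m j S := by
  intro l
  induction l with
  | nil =>
    intro j x y S hw hl hx
    have hxy : x = y := hw
    subst hxy
    exact pv_reach_seed j S x hx
  | cons z l ih =>
    intro j x y S hw hl hx
    obtain ⟨hz, hw'⟩ := hw
    rcases j with _ | j
    · simp at hl
    simp only [pvReach]
    refine ih j z y _ hw' (by simpa using hl) ?_
    rw [PySem.Set.mem_ofList]
    refine List.mem_append_right _ ?_
    simp only [pvFlatPre, List.mem_flatMap]
    exact ⟨x, hx, hz⟩

lemma pv_walk_of_frontN {m : List (Int × List Int)} :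
    ∀ (j : Nat) (F : List Int) (y : Int), y ∈ pvFrontN m j F →
      ∃ x ∈ F, ∃ l, l.length = j ∧ pvWalk m x l y := by
  intro j
  induction j with
  | zero =>
    intro F y hy
    exact ⟨y, hy, [], rfl, rfl⟩
  | succ j ih =>
    intro F y hy
    simp only [pvFrontN] at hy
    obtain ⟨x', hx', l, hl, hw⟩ := ih (pvFlatPre m F) y hy
    simp only [pvFlatPre, List.mem_flatMap] at hx'
    obtain ⟨x, hx, hcx⟩ := hx'
    exact ⟨x, hx, x' :: l, by simp [hl], ⟨hcx, hw⟩⟩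

lemma pv_walk_take {m : List (Int × List Int)} :
    ∀ (i : Nat) (l : List Int) (x y : Int), i ≤ l.length → pvWalk m x l y →
      pvWalk m x (l.take i) ((x :: l).getD i 0) ∧
      pvWalk m ((x :: l).getD i 0) (l.drop i) y := by
  intro i
  induction i with
  | zero =>
    intro l x y _ h
    exact ⟨rfl, h⟩
  | succ i ih =>
    intro l x y hle h
    cases l with
    | nil => simp at hle
    | cons z l' =>
      obtain ⟨hz, hw⟩ := h
      have hle' : i ≤ l'.length := by simpa using hle
      obtain ⟨h1, h2⟩ := ih l' z y hle' hw
      refine ⟨?_, ?_⟩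
      · rw [List.take_succ_cons]
        exact ⟨hz, by simpa [List.getD_cons_succ] using h1⟩
      · simpa [List.getD_cons_succ, List.drop_succ_cons] using h2

lemma pv_walk_keys {m : List (Int × List Int)} {x z : Int} {l : List Int} {y : Int}
    (h : pvWalk m x (z :: l) y) : x ∈ m.map Prod.fst := by
  obtain ⟨hz, _⟩ := h
  exact pv_childB_mem_keys (List.ne_nil_of_mem hz)

lemma pv_pre_term {m : List (Int × List Int)} {a : Int}
    (hcyc : ∀ x ∈ pvReach m (m.length + 1) [a],
      x ∉ pvReach m (m.length + 1) (pvChildB m x)) :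
    pvFrontN m (m.length + 1) [a] = [] := by
  by_contra hne
  obtain ⟨y, hy⟩ := List.exists_mem_of_ne_nil _ hne
  obtain ⟨x0, hx0, l, hlen, hw⟩ := pv_walk_of_frontN (m.length + 1) [a] y hy
  have hx0a : x0 = a := by simpa using hx0
  rw [hx0a] at hw
  have hdropgetD : ∀ (L : List Int) (i t : Nat), (L.drop i).getD t 0 = L.getD (i + t) 0 := by
    intro L i t
    rw [List.getD_eq_getElem?_getD, List.getD_eq_getElem?_getD, List.getElem?_drop]
  have hkeys : ∀ i ≤ m.length, (a :: l).getD i 0 ∈ m.map Prod.fst := by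
    intro i hi
    have hi' : i ≤ l.length := by omega
    have h2 := (pv_walk_take i l a y hi' hw).2
    rcases hd : l.drop i with _ | ⟨z, l2⟩
    · exfalso
      have : (l.drop i).length = 0 := by rw [hd]; rfl
      rw [List.length_drop] at this
      omega
    · rw [hd] at h2
      exact pv_walk_keys h2
  have hdup : ∃ i j, i < j ∧ j ≤ m.length ∧ (a :: l).getD i 0 = (a :: l).getD j 0 := by
    by_contra hno
    push_neg at hno
    have hnodK : ((List.range (m.length + 1)).map (fun i => (a :: l).getD i 0)).Nodup := by
      refine List.Nodup.map_on ?_ List.nodup_range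
      intro i1 h1 i2 h2 heq
      simp only [List.mem_range] at h1 h2
      by_contra hne2
      rcases Nat.lt_or_ge i1 i2 with hlt | hge
      · exact absurd heq (hno i1 i2 hlt (by omega))
      · have hlt2 : i2 < i1 := by omega
        exact absurd heq.symm (hno i2 i1 hlt2 (by omega))
    have hsub : ((List.range (m.length + 1)).map (fun i => (a :: l).getD i 0)) ⊆ m.map Prod.fst := by
      intro z hz
      simp only [List.mem_map, List.mem_range] at hz
      obtain ⟨i, hi, rfl⟩ := hz
      exact hkeys i (by omega)
    have hle := (List.subperm_of_subset hnodK hsub).length_le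
    simp only [List.length_map, List.length_range] at hle
    omega
  obtain ⟨i, j, hij, hjn, hNij⟩ := hdup
  have hreach : (a :: l).getD i 0 ∈ pvReach m (m.length + 1) [a] := by
    have h1 := (pv_walk_take i l a y (by omega) hw).1
    refine pv_reach_of_walk (l.take i) (m.length + 1) a _ [a] h1 ?_ (by simp)
    rw [List.length_take]
    omega
  have hcycmem : (a :: l).getD i 0 ∈ pvReach m (m.length + 1) (pvChildB m ((a :: l).getD i 0)) := by
    have h2 := (pv_walk_take i l a y (by omega) hw).2
    have h3 := (pv_walk_take (j - i) (l.drop i) ((a :: l).getD i 0) y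
        (by rw [List.length_drop]; omega) h2).1
    have hidx : (((a :: l).getD i 0) :: l.drop i).getD (j - i) 0 = (a :: l).getD j 0 := by
      obtain ⟨j', rfl⟩ : ∃ j', j = j' + 1 := ⟨j - 1, by omega⟩
      have hj1 : j' + 1 - i = (j' - i) + 1 := by omega
      rw [hj1, List.getD_cons_succ, hdropgetD, List.getD_cons_succ]
      congr 1
      omega
    rw [hidx, ← hNij] at h3
    rcases hseg : (l.drop i).take (j - i) with _ | ⟨c, seg'⟩
    · exfalso
      have : ((l.drop i).take (j - i)).length = 0 := by rw [hseg]; rfl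
      rw [List.length_take, List.length_drop] at this
      omega
    · rw [hseg] at h3
      obtain ⟨hc, hw'⟩ := h3
      refine pv_reach_of_walk seg' (m.length + 1) c _ _ hw' ?_ hc
      have : ((l.drop i).take (j - i)).length = seg'.length + 1 := by rw [hseg]; rfl
      rw [List.length_take, List.length_drop] at this
      omega
  exact hcyc _ hreach hcycmem

-- ===== VERDICT (by name: the statement is the Claim_ definition above) =====
theorem point_sale_survey_spec : Claim_equal_point_sale_survey := by
  intro t m a _hDom hPre
  obtain ⟨hnd, hcyc⟩ := hPre
  unfold Spec_point_sale_survey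
  have hterm : pvFrontN m (m.length + 1) [a] = [] := pv_pre_term hcyc
  have hterm' : pvFrontN m m.length (pvChildB m a) = [] := by
    simp only [pvFrontN] at hterm
    rwa [pv_flat_singleton] at hterm
  have hfr : pvFrontN m (m.length + 2) (pvChildB m a) = [] :=
    pv_frontN_empty_mono (by omega) hterm'
  have hcounts : pvDfs m (m.length + 2) a 1 [1] =
      1 :: pvPos m (m.length + 2) (pvChildB m a) := by
    rw [(pv_dfs_both m (m.length + 2)).1 a 1 [1] (by simp) hfr]
    simp [pvRadd, List.replicate_succ]
  have hfold := pv_sel_fold (pvPos m (m.length + 2) (pvChildB m a)) [1] (1, 1)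
  simp only [List.singleton_append, List.length_cons, List.length_nil, Nat.zero_add,
    Nat.cast_one] at hfold
  unfold point_sale_survey point_sale_survey_alt
  rw [pv_aloop_eq hnd (m.length + 2) [a] 1 (1, 1)]
  rw [pv_sizes_eq_pos (m.length + 2) (m.length + 1) [a] (by simp) hterm (by omega)]
  rw [pv_flat_singleton]
  rw [pv_sel_append_zero _ _ _ (by norm_num)]
  rw [hcounts]
  simp only [List.length_cons]
  rw [hfold]
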